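-- pv_equiv track=rewrite | github.com/DrDabbidy/surgical-assistant | Surgical_Assistant_Commands.py | proccessTags
-- ===== SOURCE A (Python) =====
-- def proccessTags(message, possibleTags):
--     tags = []
--     for i in range(len(possibleTags)):
--         index = message.find(" ")
--         if index != -1 and message[:index] in possibleTags:
--                 tags.append(message[:index])
--                 message = message[index+1:]
--         else:
--             return tags, message
--     return tags, message
-- ===== SOURCE B (Python) =====
-- def proccessTags(message, possibleTags):
--     tokens = message.split(" ")
--     n = min(len(possibleTags), len(tokens) - 1)
--     tags = []
--     for i in range(n):
--         if tokens[i] in possibleTags: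
--             tags.append(tokens[i])
--         else:
--             break
--     return tags, " ".join(tokens[len(tags):])
-- ===== Notes on version B (the rewrite author's own statement) =====
-- stated objective: alternative
-- what changed: B tokenises the message once with split(" ") and scans the token list (stopping before the last token and at the first non-tag), rebuilding the remainder with a single join, instead of A's repeated find/slice rescanning of the shrinking string.
import Mathlib
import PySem

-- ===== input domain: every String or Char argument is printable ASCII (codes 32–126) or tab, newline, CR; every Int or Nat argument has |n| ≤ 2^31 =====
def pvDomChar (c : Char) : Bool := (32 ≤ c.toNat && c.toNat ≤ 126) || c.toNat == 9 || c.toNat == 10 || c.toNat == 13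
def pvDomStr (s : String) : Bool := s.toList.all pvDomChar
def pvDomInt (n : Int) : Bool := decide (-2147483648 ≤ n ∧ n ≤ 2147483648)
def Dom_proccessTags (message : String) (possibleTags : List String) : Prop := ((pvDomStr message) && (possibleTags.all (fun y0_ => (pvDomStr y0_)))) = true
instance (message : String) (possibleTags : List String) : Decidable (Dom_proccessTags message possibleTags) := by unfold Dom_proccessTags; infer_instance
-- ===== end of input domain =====

-- B tokenises the message once with split(" ") and scans the tokens, instead of A's repeated find/slice on the shrinking string; same results (alternative decomposition).

-- ===== PORT A =====
-- the 'for i in range(len(possibleTags))' loop of A: fuel = number of remaining iterations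
def pvLoopA (possibleTags : List String) : Nat → String → List String → List String × String
  | 0, message, tags => (tags, message)
  | n + 1, message, tags =>
    let index := PySem.Str.find message " "
    if index ≠ -1 ∧ PySem.Str.slice message none (some index) ∈ possibleTags then
      pvLoopA possibleTags n (PySem.Str.slice message (some (index + 1)) none)
        (tags ++ [PySem.Str.slice message none (some index)])
    else (tags, message)

def proccessTags (message : String) (possibleTags : List String) : List String × String :=
  pvLoopA possibleTags possibleTags.length message []

-- ===== PORT B =====
-- the 'for i in range(n): … else: break' loop of B over the first n tokens
def pvTakeTags (possibleTags : List String) : List String → List String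
  | [] => []
  | t :: ts => if t ∈ possibleTags then t :: pvTakeTags possibleTags ts else []

def proccessTags_alt (message : String) (possibleTags : List String) : List String × String :=
  let tokens := (PySem.Str.split? message " ").getD []   -- sep " " is nonempty, so split? is always 'some'
  let n := min possibleTags.length (tokens.length - 1)
  let tags := pvTakeTags possibleTags (tokens.take n)
  (tags, PySem.Str.join " " (tokens.drop tags.length))

-- ===== PRECONDITION & SPEC =====
def Spec_proccessTags (message : String) (possibleTags : List String) (out : List String × String) : Prop := out = proccessTags_alt message possibleTags
instance (message : String) (possibleTags : List String) (out : List String × String) : Decidable (Spec_proccessTags message possibleTags out) := by unfold Spec_proccessTags; infer_instance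

-- ===== CLAIM (what is proved, stated in full; the proofs are below) =====
def Claim_equal_proccessTags : Prop := ∀ (message : String) (possibleTags : List String), Dom_proccessTags message possibleTags → Spec_proccessTags message possibleTags (proccessTags message possibleTags)

-- ===== LEMMAS AND PROOFS =====

-- proof-side reference for splitting a char list on a single space, with its char-level clones of both loops
def pvConsHead (p : List Char) : List (List Char) → List (List Char)
  | [] => [p]
  | h :: t => (p ++ h) :: t

def pvSplitSp : List Char → List (List Char)
  | [] => [[]]
  | c :: rest => if c = ' ' then [] :: pvSplitSp rest else pvConsHead [c] (pvSplitSp rest)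

theorem pvSplitSp_ne_nil (l : List Char) : pvSplitSp l ≠ [] := by
  cases l with
  | nil => simp [pvSplitSp]
  | cons c rest =>
    simp only [pvSplitSp]
    split
    · simp
    · cases h : pvSplitSp rest <;> simp [pvConsHead]

theorem pvFindGo_eq (l : List Char) : ∀ (k : Nat),
    PySem.Chars.find.go [' '] l k = if ' ' ∈ l then ((k : Int) + l.idxOf ' ') else -1 := by
  induction l with
  | nil => intro k; simp [PySem.Chars.find.go]
  | cons c rest ih =>
    intro k
    rw [PySem.Chars.find.go]
    by_cases hc : c = ' '
    · subst hc
      simp [List.isPrefixOf, List.idxOf_cons_self]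
    · have hpre : List.isPrefixOf [' '] (c :: rest) = false := by
        simp [List.isPrefixOf]; exact fun h => absurd h.symm hc
      have hidx : List.idxOf ' ' (c :: rest) = List.idxOf ' ' rest + 1 := by
        have hb : (c == ' ') = false := by simp [hc]
        simp [List.idxOf_cons, hb]
      rw [hpre, if_neg (by simp), ih (k+1)]
      by_cases hm : ' ' ∈ rest
      · rw [if_pos hm, if_pos (by simp [hm]), hidx]
        push_cast; ring
      · rw [if_neg hm, if_neg (by simp [hm]; exact fun h => hc h.symm)]
theorem pvSplitOn_go_eq (l : List Char) : ∀ (fuel : Nat) (cur : List Char) (acc : List (List Char)),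
    l.length ≤ fuel →
    PySem.Chars.splitOn.go [' '] fuel l cur acc = acc.reverse ++ pvConsHead cur.reverse (pvSplitSp l) := by
  induction l with
  | nil =>
    intro fuel cur acc _
    cases fuel <;> simp [PySem.Chars.splitOn.go, pvSplitSp, pvConsHead]
  | cons c rest ih =>
    intro fuel cur acc hf
    cases fuel with
    | zero => simp at hf
    | succ f =>
      rw [PySem.Chars.splitOn.go]
      rcases hs : pvSplitSp rest with _ | ⟨h, t⟩
      · exact absurd hs (pvSplitSp_ne_nil rest)
      by_cases hc : c = ' '
      · subst hc
        have hpre : List.isPrefixOf [' '] (' ' :: rest) = true := by simp [List.isPrefixOf]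
        rw [hpre]
        simp only [if_true]
        rw [show List.drop [' '].length (' ' :: rest) = rest from rfl]
        rw [ih f [] (List.reverse cur :: acc) (by simpa using hf), hs]
        simp [pvSplitSp, pvConsHead, hs]
      · have hpre : List.isPrefixOf [' '] (c :: rest) = false := by
          simp [List.isPrefixOf]; exact fun h => absurd h.symm hc
        rw [hpre]
        simp only [Bool.false_eq_true, if_false]
        rw [ih f (c :: cur) acc (by simpa using hf)]
        simp [pvSplitSp, hc, hs, pvConsHead]

theorem pvSplitOn_eq (l : List Char) : PySem.Chars.splitOn l [' '] = pvSplitSp l := by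
  rw [PySem.Chars.splitOn, pvSplitOn_go_eq l (l.length + 1) [] [] (by omega)]
  rcases hs : pvSplitSp l with _ | ⟨h, t⟩
  · exact absurd hs (pvSplitSp_ne_nil l)
  · simp [pvConsHead]

theorem pvFind_space (l : List Char) :
    PySem.Chars.find l [' '] = if ' ' ∈ l then (l.idxOf ' ' : Int) else -1 := by
  rw [PySem.Chars.find, pvFindGo_eq]
  simp

theorem pvNotMemTakeIdxOf (l : List Char) : ' ' ∉ l.take (l.idxOf ' ') := by
  induction l with
  | nil => simp
  | cons c rest ih =>
    by_cases hc : c = ' '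
    · subst hc; simp [List.idxOf_cons_self]
    · have hb : (c == ' ') = false := by simp [hc]
      simp [List.idxOf_cons, hb]
      exact ⟨fun h => hc h.symm, ih⟩

theorem pvJoin_splitSp (l : List Char) : PySem.Chars.join [' '] (pvSplitSp l) = l := by
  induction l with
  | nil => rfl
  | cons c rest ih =>
    rw [pvSplitSp]
    rcases hs : pvSplitSp rest with _ | ⟨h, t⟩
    · exact absurd hs (pvSplitSp_ne_nil rest)
    · rw [hs] at ih
      split
      · next hc =>
        subst hc
        rw [PySem.Chars.join_cons_cons, ih]
        rfl
      · rw [pvConsHead]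
        cases t with
        | nil =>
          rw [PySem.Chars.join_singleton] at ih
          rw [PySem.Chars.join_singleton, List.singleton_append, ih]
        | cons q t' =>
          rw [PySem.Chars.join_cons_cons] at ih
          rw [PySem.Chars.join_cons_cons, ← ih]
          simp

theorem pvSplitSp_no_space (l : List Char) (h : ' ' ∉ l) : pvSplitSp l = [l] := by
  induction l with
  | nil => rfl
  | cons c rest ih =>
    simp only [List.mem_cons, not_or] at h
    rw [pvSplitSp, if_neg (fun hc => h.1 hc.symm), ih h.2]
    rfl

theorem pvSplitSp_split (pre rest : List Char) (h : ' ' ∉ pre) :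
    pvSplitSp (pre ++ ' ' :: rest) = pre :: pvSplitSp rest := by
  induction pre with
  | nil => simp [pvSplitSp]
  | cons c p ih =>
    simp only [List.mem_cons, not_or] at h
    rw [List.cons_append, pvSplitSp, if_neg (fun hc => h.1 hc.symm), ih h.2]
    rfl

def pvTakeTagsC (Q : List (List Char)) : List (List Char) → List (List Char)
  | [] => []
  | t :: ts => if t ∈ Q then t :: pvTakeTagsC Q ts else []

def pvAltC (Q : List (List Char)) (n : Nat) (cs : List Char) : List (List Char) × List Char :=
  let toks := pvSplitSp cs
  let tags := pvTakeTagsC Q (toks.take (min n (toks.length - 1)))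
  (tags, PySem.Chars.join [' '] (toks.drop tags.length))

def pvLoopC (Q : List (List Char)) : Nat → List Char → List (List Char) → List (List Char) × List Char
  | 0, cs, tags => (tags, cs)
  | n + 1, cs, tags =>
    let j := PySem.Chars.find cs [' ']
    if j ≠ -1 ∧ PySem.Chars.slice cs none (some j) ∈ Q then
      pvLoopC Q n (PySem.Chars.slice cs (some (j + 1)) none) (tags ++ [PySem.Chars.slice cs none (some j)])
    else (tags, cs)

theorem pvMain (Q : List (List Char)) : ∀ (n : Nat) (cs : List Char) (tags : List (List Char)),
    pvLoopC Q n cs tags = (tags ++ (pvAltC Q n cs).1, (pvAltC Q n cs).2) := by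
  intro n
  induction n with
  | zero =>
    intro cs tags
    simp [pvLoopC, pvAltC, pvTakeTagsC, pvJoin_splitSp]
  | succ n ih =>
    intro cs tags
    rw [pvLoopC]
    by_cases hm : ' ' ∈ cs
    · -- there is a space: find = idxOf
      set k := cs.idxOf ' ' with hk
      have hfind : PySem.Chars.find cs [' '] = (k : Int) := by rw [pvFind_space, if_pos hm]
      have hklt : k < cs.length := List.idxOf_lt_length_of_mem hm
      have hsl1 : PySem.Chars.slice cs none (some ((k : Nat) : Int)) = cs.take k := by
        simp [PySem.Chars.slice_eq_listSlice, PySem.List.slice_to_natCast]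
      have hsl2 : PySem.Chars.slice cs (some (((k : Nat) : Int) + 1)) none = cs.drop (k + 1) := by
        simp only [PySem.Chars.slice_eq_listSlice]
        rw [PySem.List.slice_from _ (by omega)]
        rw [show ((k : Int) + 1).toNat = k + 1 from by omega]
      have hdecomp : cs = cs.take k ++ ' ' :: cs.drop (k + 1) := by
        conv_lhs => rw [← List.take_append_drop k cs]
        rw [← List.getElem_cons_drop hklt, List.getElem_idxOf hklt]
      have hsplit : pvSplitSp cs = cs.take k :: pvSplitSp (cs.drop (k + 1)) := by
        conv_lhs => rw [hdecomp]
        exact pvSplitSp_split _ _ (pvNotMemTakeIdxOf cs)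
      rcases hts : pvSplitSp (cs.drop (k + 1)) with _ | ⟨h, t⟩
      · exact absurd hts (pvSplitSp_ne_nil _)
      have hlen1 : 1 ≤ (pvSplitSp (cs.drop (k + 1))).length := by rw [hts]; simp
      by_cases hQ : cs.take k ∈ Q
      · rw [hfind, if_pos ⟨by omega, by rw [hsl1]; exact hQ⟩]
        rw [hsl1, hsl2, ih]
        have hmin : min (n + 1) (pvSplitSp (cs.drop (k+1))).length = min n ((pvSplitSp (cs.drop (k+1))).length - 1) + 1 := by
          omega
        simp only [pvAltC, hsplit, List.length_cons, Nat.add_sub_cancel, hmin,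
          List.take_succ_cons, pvTakeTagsC, if_pos hQ, List.drop_succ_cons]
        simp
      · rw [hfind, if_neg (by rw [hsl1]; exact fun hand => hQ hand.2)]
        have hmin : min (n + 1) (pvSplitSp (cs.drop (k+1))).length = min n ((pvSplitSp (cs.drop (k+1))).length - 1) + 1 := by
          omega
        simp only [pvAltC, hsplit, List.length_cons, Nat.add_sub_cancel, hmin,
          List.take_succ_cons, pvTakeTagsC, if_neg hQ]
        simp [pvJoin_splitSp cs, ← hsplit]
    · have hfind : PySem.Chars.find cs [' '] = -1 := by rw [pvFind_space, if_neg hm]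
      rw [hfind, if_neg (by simp)]
      have hsp : pvSplitSp cs = [cs] := pvSplitSp_no_space cs hm
      simp [pvAltC, hsp, pvTakeTagsC, PySem.Chars.join_singleton]

theorem pvSpToList : (" " : String).toList = [' '] := by decide

theorem pvMemToList (s : String) (P : List String) : s.toList ∈ P.map String.toList ↔ s ∈ P := by
  rw [List.mem_map]
  constructor
  · rintro ⟨t, ht, he⟩
    rwa [← String.toList_inj.mp he]
  · exact fun h => ⟨s, h, rfl⟩

theorem pvLoopA_lift (P : List String) : ∀ (n : Nat) (s : String) (tags : List String),
    pvLoopA P n s tags =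
      (((pvLoopC (P.map String.toList) n s.toList (tags.map String.toList)).1.map String.ofList),
        String.ofList (pvLoopC (P.map String.toList) n s.toList (tags.map String.toList)).2) := by
  intro n
  induction n with
  | zero =>
    intro s tags
    simp [pvLoopA, pvLoopC, List.map_map, Function.comp_def, String.ofList_toList]
  | succ n ih =>
    intro s tags
    simp only [pvLoopA, pvLoopC]
    have hfind : PySem.Str.find s " " = PySem.Chars.find s.toList [' '] := by
      rw [PySem.Str.find_eq, pvSpToList]
    rw [hfind]
    set j := PySem.Chars.find s.toList [' '] with hj
    have hcond : (j ≠ -1 ∧ PySem.Str.slice s none (some j) ∈ P) ↔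
        (j ≠ -1 ∧ PySem.Chars.slice s.toList none (some j) ∈ P.map String.toList) := by
      rw [← pvMemToList, PySem.Str.toList_slice]
    by_cases hc : j ≠ -1 ∧ PySem.Chars.slice s.toList none (some j) ∈ P.map String.toList
    · rw [if_pos (hcond.mpr hc), if_pos hc, ih]
      simp [PySem.Str.toList_slice]
    · rw [if_neg (fun hh => hc (hcond.mp hh)), if_neg hc]
      simp [List.map_map, Function.comp_def, String.ofList_toList]

theorem pvTakeTags_lift (P : List String) (ts : List (List Char)) :
    pvTakeTags P (ts.map String.ofList) = (pvTakeTagsC (P.map String.toList) ts).map String.ofList := by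
  induction ts with
  | nil => rfl
  | cons t ts ih =>
    have hmem : String.ofList t ∈ P ↔ t ∈ P.map String.toList := by
      rw [← pvMemToList, String.toList_ofList]
    simp only [List.map_cons, pvTakeTags, pvTakeTagsC]
    by_cases h : t ∈ P.map String.toList
    · rw [if_pos (hmem.mpr h), if_pos h, ih, List.map_cons]
    · rw [if_neg (fun hh => h (hmem.mp hh)), if_neg h, List.map_nil]

theorem pvAlt_lift (s : String) (P : List String) :
    proccessTags_alt s P =
      (((pvAltC (P.map String.toList) P.length s.toList).1.map String.ofList),
        String.ofList (pvAltC (P.map String.toList) P.length s.toList).2) := by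
  have hsplit : PySem.Str.split? s " " = some ((pvSplitSp s.toList).map String.ofList) := by
    rw [PySem.Str.split?, pvSpToList, PySem.Chars.split?]
    rw [if_neg (by simp), pvSplitOn_eq]
    rfl
  simp only [proccessTags_alt, hsplit, Option.getD_some, pvAltC]
  rw [List.length_map, ← List.map_take, pvTakeTags_lift, List.length_map, ← List.map_drop]
  congr 1
  rw [PySem.Str.join, pvSpToList]
  congr 1
  simp [List.map_map, Function.comp_def, String.toList_ofList]

theorem proccessTags_equal (s : String) (P : List String) :
    pvLoopA P P.length s [] = proccessTags_alt s P := by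
  rw [pvAlt_lift,
    show ([] : List String) = ([] : List (List Char)).map String.ofList from rfl,
    pvLoopA_lift, pvMain]
  simp

-- ===== VERDICT (by name: the statement is the Claim_ definition above) =====
theorem proccessTags_spec : Claim_equal_proccessTags := by
  intro s P _
  unfold Spec_proccessTags
  show proccessTags s P = proccessTags_alt s P
  rw [proccessTags]
  exact proccessTags_equal s P
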